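-- pv_equiv track=rewrite | github.com/muneebaifrah/Unstop-100-Days-Coding-Sprint | Day-77/1.Unique_Increasing_String.py | count_strictly_increasing_substrings
-- ===== SOURCE A (Python) =====
-- def count_strictly_increasing_substrings(S):
--     N = len(S)
--     unique_substrings = set()
--
--     for i in range(N):
--         current = S[i]
--         unique_substrings.add(current)
--         for j in range(i + 1, N):
--             if S[j] > S[j - 1]:
--                 current += S[j]
--                 unique_substrings.add(current)
--             else:
--                 break  # stop if the sequence is no longer strictly increasing
--
--     return len(unique_substrings)
-- ===== SOURCE B (Python) =====
-- def count_strictly_increasing_substrings(S):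
--     # Partition S into its maximal strictly increasing runs (one pass to find
--     # boundaries), then collect every substring of each run via slices.
--     seen = set()
--     n = len(S)
--     start = 0
--     for k in range(1, n + 1):
--         if k == n or S[k] <= S[k - 1]:
--             run = S[start:k]
--             for a in range(len(run)):
--                 for b in range(a + 1, len(run) + 1):
--                     seen.add(run[a:b])
--             start = k
--     return len(seen)
-- ===== Notes on version B (the rewrite author's own statement) =====
-- stated objective: alternative
-- what changed: A scans forward from every start index with a break, growing the current substring by concatenation; B instead makes one pass to split S into its maximal strictly increasing runs and then enumerates each run's substrings directly by slicing.
import Mathlib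
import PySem

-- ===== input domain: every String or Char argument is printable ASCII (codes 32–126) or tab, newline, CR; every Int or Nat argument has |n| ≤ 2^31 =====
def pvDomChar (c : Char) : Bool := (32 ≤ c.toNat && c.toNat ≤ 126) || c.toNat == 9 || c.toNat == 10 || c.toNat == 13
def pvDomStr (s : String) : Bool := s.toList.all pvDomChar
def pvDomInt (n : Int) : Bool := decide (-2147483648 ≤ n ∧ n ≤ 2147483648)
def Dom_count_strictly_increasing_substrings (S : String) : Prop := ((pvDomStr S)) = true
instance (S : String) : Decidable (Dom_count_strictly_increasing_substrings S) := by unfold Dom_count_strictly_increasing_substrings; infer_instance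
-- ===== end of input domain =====

-- B replaces A's per-start forward scan (with break) by a single pass that splits S into
-- its maximal strictly increasing runs and enumerates each run's substrings by slicing
-- (objective: alternative decomposition, same exact result).

-- ===== PORT A =====
-- inner 'for j in range(i+1, N): …' with break; indices j produced by range are in-bounds,
-- so List.getD is exact for S[j] / S[j-1]
def aJloop (cs : List Char) (N j : Nat) (current : List Char) (u : PySem.Set (List Char)) :
    PySem.Set (List Char) :=
  if j < N then
    if cs.getD (j - 1) ' ' < cs.getD j ' ' then
      aJloop cs N (j + 1) (current ++ [cs.getD j ' ']) (PySem.Set.add u (current ++ [cs.getD j ' ']))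
    else u
  else u
  termination_by N - j

def count_strictly_increasing_substrings (S : String) : Int :=
  let cs := S.toList
  let N := cs.length
  let u := (List.range N).foldl
    (fun u i => aJloop cs N (i + 1) [cs.getD i ' '] (PySem.Set.add u [cs.getD i ' ']))
    PySem.Set.empty
  PySem.Set.len u

-- ===== PORT B =====
-- 'for a in range(len(run)): for b in range(a+1, len(run)+1): seen.add(run[a:b])'
def bAddRun (run : List Char) (u : PySem.Set (List Char)) : PySem.Set (List Char) :=
  (List.range run.length).foldl
    (fun u a =>
      (List.range' (a + 1) (run.length - a)).foldl
        (fun u (b : Nat) => PySem.Set.add u (PySem.List.slice run (some (a : Int)) (some (b : Int)))) u)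
    u

def count_strictly_increasing_substrings_alt (S : String) : Int :=
  let cs := S.toList
  let n := cs.length
  let p := (List.range' 1 n).foldl
    (fun (p : PySem.Set (List Char) × Nat) k =>
      if k = n ∨ cs.getD k ' ' ≤ cs.getD (k - 1) ' ' then
        (bAddRun (PySem.List.slice cs (some (p.2 : Int)) (some (k : Int))) p.1, k)
      else p)
    (PySem.Set.empty, 0)
  PySem.Set.len p.1

-- ===== PRECONDITION & SPEC =====
def Spec_count_strictly_increasing_substrings (S : String) (out : Int) : Prop := out = count_strictly_increasing_substrings_alt S
instance (S : String) (out : Int) : Decidable (Spec_count_strictly_increasing_substrings S out) := by unfold Spec_count_strictly_increasing_substrings; infer_instance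

-- ===== CLAIM (what is proved, stated in full; the proofs are below) =====
def Claim_equal_count_strictly_increasing_substrings : Prop := ∀ (S : String), Dom_count_strictly_increasing_substrings S → Spec_count_strictly_increasing_substrings S (count_strictly_increasing_substrings S)

-- ===== LEMMAS AND PROOFS =====

-- canonical list of inserted substrings: for each start position, the extensions while increasing
def extS (p : Char) (rest : List Char) (cur : List Char) : List (List Char) :=
  match rest with
  | [] => []
  | c :: t => if p < c then (cur ++ [c]) :: extS c t (cur ++ [c]) else []

def insC : List Char → List (List Char)
  | [] => []
  | c :: t => ([c] :: extS c t [c]) ++ insC t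

-- maximal strictly increasing run prefix and the remainder
def firstRun : List Char → List Char × List Char
  | [] => ([], [])
  | [c] => ([c], [])
  | a :: b :: t => if a < b then ((a :: (firstRun (b :: t)).1), (firstRun (b :: t)).2)
                   else ([a], b :: t)

lemma getD_append_helper (pre l : List Char) (m : Nat) (d : Char) :
    (pre ++ l).getD (pre.length + m) d = l.getD m d := by
  simp [List.getD, List.getElem?_append_right]

lemma A1 : ∀ (rest pre : List Char) (p : Char) (cur : List Char) (u : PySem.Set (List Char)),
    aJloop (pre ++ p :: rest) (pre ++ p :: rest).length (pre.length + 1) cur u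
      = (extS p rest cur).foldl PySem.Set.add u := by
  intro rest
  induction rest with
  | nil =>
    intro pre p cur u
    rw [aJloop]
    simp [extS]
  | cons c t ih =>
    intro pre p cur u
    rw [aJloop]
    have h1 : (pre ++ p :: c :: t).getD (pre.length + 1 - 1) ' ' = p := by
      simp
    have h2 : (pre ++ p :: c :: t).getD (pre.length + 1) ' ' = c := by
      simp
    have hlt : pre.length + 1 < (pre ++ p :: c :: t).length := by simp
    rw [if_pos hlt, h1, h2]
    by_cases hpc : p < c
    · rw [if_pos hpc]
      have := ih (pre ++ [p]) c (cur ++ [c]) (PySem.Set.add u (cur ++ [c]))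
      simp only [List.append_assoc, List.cons_append, List.nil_append, List.length_append,
        List.length_cons, List.length_nil] at this ⊢
      rw [show pre.length + 1 + 1 = pre.length + (1 + 1) by omega] at this
      simpa [extS, hpc] using this
    · rw [if_neg hpc]
      simp [extS, hpc]

lemma A2 : ∀ (suffix pre : List Char) (u : PySem.Set (List Char)),
    (List.range' pre.length suffix.length).foldl
      (fun u i => aJloop (pre ++ suffix) (pre ++ suffix).length (i + 1)
                    [(pre ++ suffix).getD i ' ']
                    (PySem.Set.add u [(pre ++ suffix).getD i ' '])) u
      = (insC suffix).foldl PySem.Set.add u := by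
  intro suffix
  induction suffix with
  | nil => intro pre u; simp [insC]
  | cons c t ih =>
    intro pre u
    rw [List.length_cons, List.range'_succ, List.foldl_cons]
    have hc : (pre ++ c :: t).getD pre.length ' ' = c := by
      simp
    rw [hc, A1 t pre c [c] (PySem.Set.add u [c])]
    have := ih (pre ++ [c]) ((extS c t [c]).foldl PySem.Set.add (PySem.Set.add u [c]))
    simp only [List.append_assoc, List.cons_append, List.nil_append, List.length_append,
      List.length_cons, List.length_nil] at this ⊢
    rw [this]
    simp [insC, List.foldl_append]

-- B-side proof infrastructure
def bstep (cs : List Char) (p : PySem.Set (List Char) × Nat) (k : Nat) :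
    PySem.Set (List Char) × Nat :=
  if k = cs.length ∨ cs.getD k ' ' ≤ cs.getD (k - 1) ' ' then
    (bAddRun (PySem.List.slice cs (some (p.2 : Int)) (some (k : Int))) p.1, k)
  else p

def Bnd (R rest : List Char) : Prop :=
  ∀ d l, rest.head? = some d → R.getLast? = some l → d ≤ l

lemma getD_append_left (R rest : List Char) (m : Nat) (d : Char) (h : m < R.length) :
    (R ++ rest).getD m d = R.getD m d := by
  simp [List.getD, List.getElem?_append_left h]

lemma fr1 : ∀ cs : List Char, (firstRun cs).1 ++ (firstRun cs).2 = cs := by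
  intro cs
  fun_induction firstRun cs with
  | case1 => rfl
  | case2 c => rfl
  | case3 a b t h ih => simpa [firstRun] using ih
  | case4 a b t h => simp

lemma fr2 : ∀ cs : List Char, cs ≠ [] → (firstRun cs).1 ≠ [] := by
  intro cs
  fun_induction firstRun cs <;> simp [*]

lemma fr3 : ∀ cs : List Char, ((firstRun cs).1).IsChain (· < ·) := by
  intro cs
  fun_induction firstRun cs with
  | case1 => simp
  | case2 c => simp
  | case3 a b t h ih =>
    have hb : (firstRun (b :: t)).1 ≠ [] := fr2 _ (by simp)
    rcases hne : (firstRun (b :: t)).1 with _ | ⟨x, xs⟩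
    · exact absurd hne hb
    · have hx : x = b := by
        have := fr1 (b :: t)
        rw [hne] at this
        simpa using congrArg (fun l => l.head? ) this
      rw [hne] at ih
      subst hx
      exact ih.cons (by intro y hy; simp at hy; subst hy; exact h)
  | case4 a b t h => simp

lemma getLast?_cons_ne (a : Char) (l : List Char) (h : l ≠ []) :
    (a :: l).getLast? = l.getLast? := by
  rcases l with _ | ⟨b, t⟩
  · exact absurd rfl h
  · exact List.getLast?_cons_cons

lemma fr4 : ∀ cs : List Char, Bnd (firstRun cs).1 (firstRun cs).2 := by
  intro cs
  fun_induction firstRun cs with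
  | case1 => intro d l hd hl; simp at hd
  | case2 c => intro d l hd hl; simp at hd
  | case3 a b t h ih =>
    intro d l hd hl
    have hb : (firstRun (b :: t)).1 ≠ [] := fr2 _ (by simp)
    rw [getLast?_cons_ne _ _ hb] at hl
    exact ih d l hd hl
  | case4 a b t h =>
    intro d l hd hl
    simp at hd hl
    subst hd; subst hl; exact le_of_not_gt h

lemma lemE : ∀ (u' rest : List Char) (p : Char) (cur : List Char),
    (p :: u').IsChain (· < ·) → Bnd (p :: u') rest →
    extS p (u' ++ rest) cur = extS p u' cur := by
  intro u'
  induction u' with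
  | nil =>
    intro rest p cur hch hb
    rcases rest with _ | ⟨d, t⟩
    · rfl
    · have hd : d ≤ p := hb d p rfl (by simp)
      simp [extS, not_lt.mpr hd]
  | cons c u'' ih =>
    intro rest p cur hch hb
    rw [List.isChain_cons_cons] at hch
    simp only [List.cons_append, extS]
    by_cases hpc : p < c
    · rw [if_pos hpc, if_pos hpc]
      rw [ih rest c (cur ++ [c]) hch.2 ?_]
      intro d l hd hl
      exact hb d l hd (by rw [List.getLast?_cons_cons]; exact hl)
    · rw [if_neg hpc, if_neg hpc]

lemma lemC : ∀ R rest : List Char, R.IsChain (· < ·) → Bnd R rest →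
    insC (R ++ rest) = insC R ++ insC rest := by
  intro R
  induction R with
  | nil =>
    intro rest _ _
    simp [insC]
  | cons c R' ih =>
    intro rest hch hb
    simp only [List.cons_append, insC]
    rw [lemE R' rest c [c] hch hb]
    rw [ih rest (List.IsChain.of_cons hch) ?_]
    · simp
    · intro d l hd hl
      rcases R' with _ | ⟨x, xs⟩
      · simp at hl
      · exact hb d l hd (by rw [List.getLast?_cons_cons]; exact hl)

lemma lemE2 : ∀ (t : List Char) (p : Char) (cur : List Char), (p :: t).IsChain (· < ·) →
    extS p t cur = (List.range' 1 t.length).map (fun m => cur ++ t.take m) := by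
  intro t
  induction t with
  | nil => intro p cur _; rfl
  | cons c t' ih =>
    intro p cur hch
    rw [List.isChain_cons_cons] at hch
    simp only [extS, if_pos hch.1, List.length_cons, List.range'_succ]
    rw [ih c (cur ++ [c]) hch.2]
    simp only [List.map_cons, List.take_succ_cons, List.take_zero]
    congr 1
    rw [List.range'_eq_map_range, List.range'_eq_map_range, List.map_map, List.map_map]
    apply List.map_congr_left
    intro i _
    simp [List.take_succ_cons, Nat.add_comm]

lemma lemFix {α β : Type} (l : List β) (f : α → β → α) (s : α)
    (h : ∀ k ∈ l, f s k = s) : l.foldl f s = s := by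
  induction l with
  | nil => rfl
  | cons x xs ih =>
    rw [List.foldl_cons, h x (by simp)]
    exact ih (fun k hk => h k (by simp [hk]))

lemma foldl_range'_shift {α : Type} (f : α → Nat → α) (s n : Nat) (init : α) :
    (List.range' (s + 1) n).foldl f init
      = (List.range' s n).foldl (fun a b => f a (b + 1)) init := by
  rw [List.range'_eq_map_range, List.range'_eq_map_range, List.foldl_map, List.foldl_map]
  have he : (fun (x : α) (y : Nat) => f x (s + 1 + y)) = (fun x y => f x (s + y + 1)) := by
    funext x y; congr 1; omega
  rw [he]

lemma slice_cons_shift (c : Char) (t : List Char) (a b : Nat) :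
    PySem.List.slice (c :: t) (some ((a + 1 : Nat) : Int)) (some ((b + 1 : Nat) : Int))
      = PySem.List.slice t (some (a : Int)) (some (b : Int)) := by
  rw [PySem.List.slice_natCast, PySem.List.slice_natCast]
  simp [Nat.succ_sub_succ]

lemma bAddRun_cons (c : Char) (t : List Char) (u : PySem.Set (List Char)) :
    bAddRun (c :: t) u
      = bAddRun t ((List.range' 1 (t.length + 1)).foldl
          (fun u b => PySem.Set.add u ((c :: t).take b)) u) := by
  show (List.range (c :: t).length).foldl _ u = _
  rw [show (c :: t).length = t.length + 1 from rfl, List.range_eq_range', List.range'_succ,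
    List.foldl_cons]
  have h0 : (List.range' (0 + 1) (t.length + 1 - 0)).foldl
      (fun u (b : Nat) => PySem.Set.add u (PySem.List.slice (c :: t) (some ((0 : Nat) : Int)) (some (b : Int)))) u
      = (List.range' 1 (t.length + 1)).foldl (fun u b => PySem.Set.add u ((c :: t).take b)) u := by
    have he : (fun (u : PySem.Set (List Char)) (b : Nat) =>
        PySem.Set.add u (PySem.List.slice (c :: t) (some ((0 : Nat) : Int)) (some (b : Int))))
        = (fun u b => PySem.Set.add u ((c :: t).take b)) := by
      funext u b
      rw [PySem.List.slice_natCast]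
      simp
    rw [he]
    simp
  rw [h0]
  rw [foldl_range'_shift]
  have he2 : (fun (u : PySem.Set (List Char)) (a : Nat) =>
      (List.range' (a + 1 + 1) (t.length + 1 - (a + 1))).foldl
        (fun u (b : Nat) => PySem.Set.add u (PySem.List.slice (c :: t) (some ((a + 1 : Nat) : Int)) (some (b : Int)))) u)
      = (fun (u : PySem.Set (List Char)) (a : Nat) =>
      (List.range' (a + 1) (t.length - a)).foldl
        (fun u (b : Nat) => PySem.Set.add u (PySem.List.slice t (some ((a : Nat) : Int)) (some (b : Int)))) u) := by
    funext u a
    rw [show t.length + 1 - (a + 1) = t.length - a from by omega]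
    rw [foldl_range'_shift]
    have he3 : (fun (u : PySem.Set (List Char)) (b : Nat) =>
        PySem.Set.add u (PySem.List.slice (c :: t) (some ((a + 1 : Nat) : Int)) (some ((b + 1 : Nat) : Int))))
        = (fun u (b : Nat) => PySem.Set.add u (PySem.List.slice t (some ((a : Nat) : Int)) (some (b : Int)))) := by
      funext u b
      rw [slice_cons_shift]
    rw [he3]
  rw [he2]
  unfold bAddRun
  rw [List.range_eq_range']

lemma head_fold (c : Char) (t : List Char) (u : PySem.Set (List Char))
    (hch : (c :: t).IsChain (· < ·)) :
    (List.range' 1 (t.length + 1)).foldl (fun u b => PySem.Set.add u ((c :: t).take b)) u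
      = ([c] :: extS c t [c]).foldl PySem.Set.add u := by
  rw [show (List.range' 1 (t.length + 1)).foldl (fun u b => PySem.Set.add u ((c :: t).take b)) u
      = ((List.range' 1 (t.length + 1)).map (fun b => (c :: t).take b)).foldl PySem.Set.add u
      from (List.foldl_map).symm]
  congr 1
  rw [lemE2 t c [c] hch, List.range'_succ, List.map_cons]
  simp only [List.take_succ_cons, List.take_zero]
  congr 1
  rw [List.range'_eq_map_range, List.range'_eq_map_range, List.map_map, List.map_map]
  apply List.map_congr_left
  intro i _
  simp [List.take_succ_cons, Nat.add_comm]

lemma lemB3 : ∀ (R : List Char) (u : PySem.Set (List Char)), R.IsChain (· < ·) →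
    bAddRun R u = (insC R).foldl PySem.Set.add u := by
  intro R
  induction R with
  | nil => intro u _; rfl
  | cons c t ih =>
    intro u hch
    rw [bAddRun_cons, head_fold c t u hch, ih _ (List.IsChain.of_cons hch)]
    simp [insC, List.foldl_append]

lemma lemB2 : ∀ (N : Nat) (suffix pre : List Char) (u : PySem.Set (List Char)),
    suffix.length ≤ N → suffix ≠ [] →
    (List.range' (pre.length + 1) suffix.length).foldl (bstep (pre ++ suffix)) (u, pre.length)
      = ((insC suffix).foldl PySem.Set.add u, (pre ++ suffix).length) := by
  intro N
  induction N with
  | zero =>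
    intro suffix pre u hle hne
    rcases suffix with _ | ⟨c, t⟩
    · exact absurd rfl hne
    · simp at hle
  | succ N ih =>
    intro suffix pre u hle hne
    obtain ⟨R, rest, hRr, hRne, hch, hbnd⟩ :
        ∃ R rest, R ++ rest = suffix ∧ R ≠ [] ∧ R.IsChain (· < ·) ∧ Bnd R rest :=
      ⟨(firstRun suffix).1, (firstRun suffix).2, fr1 suffix, fr2 suffix hne, fr3 suffix, fr4 suffix⟩
    subst hRr
    have hL : 1 ≤ R.length := by
      rcases R with _ | _
      · exact absurd rfl hRne
      · simp
    -- split the index range into the first run and the remainder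
    have hsplit : List.range' (pre.length + 1) (R ++ rest).length
        = (List.range' (pre.length + 1) (R.length - 1)
            ++ [pre.length + R.length])
            ++ List.range' (pre.length + R.length + 1) rest.length := by
      rw [show [pre.length + R.length] = List.range' (pre.length + 1 + (R.length - 1)) 1 from by
        rw [List.range'_one]; congr 1; omega]
      rw [show pre.length + 1 + (R.length - 1) = pre.length + 1 + 1 * (R.length - 1) from by ring_nf]
      rw [List.range'_append]
      rw [show pre.length + R.length + 1 = pre.length + 1 + 1 * (R.length - 1 + 1) from by omega]
      rw [List.range'_append]
      congr 1
      simp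
      omega
    rw [hsplit, List.foldl_append, List.foldl_append]
    -- phase 1a: inside the first run nothing happens
    have hfix : (List.range' (pre.length + 1) (R.length - 1)).foldl
        (bstep (pre ++ (R ++ rest))) (u, pre.length) = (u, pre.length) := by
      apply lemFix
      intro k hk
      rw [List.mem_range'_1] at hk
      have hkn : k ≠ (pre ++ (R ++ rest)).length := by simp; omega
      have hinc : ¬ ((pre ++ (R ++ rest)).getD k ' ' ≤ (pre ++ (R ++ rest)).getD (k - 1) ' ') := by
        have hm1 : k - 1 = pre.length + (k - 1 - pre.length) := by omega
        have hm2 : k = pre.length + (k - pre.length) := by omega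
        rw [not_le]
        conv_lhs => rw [hm1, getD_append_helper, getD_append_left _ _ _ _ (by omega)]
        conv_rhs => rw [hm2, getD_append_helper, getD_append_left _ _ _ _ (by omega)]
        have harg : k - pre.length = (k - 1 - pre.length) + 1 := by omega
        rw [harg]
        rw [List.getD_eq_getElem _ _ (by omega), List.getD_eq_getElem _ _ (by omega)]
        exact List.isChain_iff_getElem.mp hch (k - 1 - pre.length) (by omega)
      simp only [bstep, hkn, hinc, or_self, ite_false]
    rw [hfix]
    -- phase 1b: the boundary index flushes the run
    have hflush : bstep (pre ++ (R ++ rest)) (u, pre.length) (pre.length + R.length)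
        = ((insC R).foldl PySem.Set.add u, pre.length + R.length) := by
      have hcond : (pre.length + R.length = (pre ++ (R ++ rest)).length ∨
          (pre ++ (R ++ rest)).getD (pre.length + R.length) ' '
            ≤ (pre ++ (R ++ rest)).getD (pre.length + R.length - 1) ' ') := by
        rcases rest with _ | ⟨d, t'⟩
        · left; simp
        · right
          have h1 : (pre ++ (R ++ d :: t')).getD (pre.length + R.length) ' ' = d := by
            rw [show pre ++ (R ++ d :: t') = (pre ++ R) ++ d :: t' from by simp]
            simp
          have h2 : (pre ++ (R ++ d :: t')).getD (pre.length + R.length - 1) ' '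
              = R.getD (R.length - 1) ' ' := by
            have : pre.length + R.length - 1 = pre.length + (R.length - 1) := by omega
            rw [this, getD_append_helper, getD_append_left _ _ _ _ (by omega)]
          rw [h1, h2]
          apply hbnd d
          · rfl
          · rw [List.getLast?_eq_getElem?, List.getElem?_eq_getElem (by omega),
              ← List.getD_eq_getElem _ ' ' (by omega)]
      have hslice : PySem.List.slice (pre ++ (R ++ rest)) (some (pre.length : Int))
          (some ((pre.length + R.length : Nat) : Int)) = R := by
        rw [PySem.List.slice_natCast]
        rw [show pre.length + R.length - pre.length = R.length from by omega]
        rw [show List.drop pre.length (pre ++ (R ++ rest)) = R ++ rest from by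
          simp]
        exact List.take_left' rfl
      simp only [bstep, hcond, if_pos]
      rw [hslice, lemB3 R u hch]
    simp only [List.foldl_cons, List.foldl_nil]
    rw [hflush]
    -- phase 2: the remainder of the string
    rcases hrest : rest with _ | ⟨d, t'⟩
    · subst hrest
      simp
    · subst hrest
      have hlen : (d :: t').length ≤ N := by
        have := hle
        simp at this ⊢
        omega
      have heq := ih (d :: t') (pre ++ R) ((insC R).foldl PySem.Set.add u) hlen (by simp)
      simp only [List.append_assoc, List.length_append] at heq ⊢
      rw [heq, lemC R (d :: t') hch hbnd]
      simp [List.foldl_append]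

theorem count_strictly_increasing_substrings_spec : Claim_equal_count_strictly_increasing_substrings := by
  intro S _
  unfold Spec_count_strictly_increasing_substrings
  unfold count_strictly_increasing_substrings count_strictly_increasing_substrings_alt
  dsimp only
  have hBB : (fun (p : PySem.Set (List Char) × Nat) (k : Nat) =>
      if k = S.toList.length ∨ S.toList.getD k ' ' ≤ S.toList.getD (k - 1) ' ' then
        (bAddRun (PySem.List.slice S.toList (some (p.2 : Int)) (some (k : Int))) p.1, k)
      else p) = bstep S.toList := rfl
  rw [hBB]
  have hA := A2 S.toList [] PySem.Set.empty
  simp only [List.nil_append, List.length_nil] at hA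
  rw [List.range_eq_range', hA]
  by_cases h : S.toList = []
  · rw [h]
    rfl
  · have hB := lemB2 S.toList.length S.toList [] PySem.Set.empty (le_refl _) h
    simp only [List.nil_append, List.length_nil, Nat.zero_add] at hB
    rw [hB]
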